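-- pv_equiv track=rewrite | github.com/modirniya/statistics-numerical-measures-calculator | numerical_measures_library.py | generate_frequency_map
-- ===== SOURCE A (Python) =====
-- def generate_frequency_map(data_points: list):
--     results = {}
--     for point in data_points:
--         if point in results.keys():
--             results[point] += 1
--         else:
--             results[point] = 1
--     return results
-- ===== SOURCE B (Python) =====
-- def generate_frequency_map(data_points: list):
--     return {p: data_points.count(p) for p in data_points}
-- ===== Notes on version B (the rewrite author's own statement) =====
-- stated objective: idiomatic
-- what changed: Replaced the single-pass accumulation dict with a dict comprehension that rescans the list with .count for each element, iterating the list itself so insertion order matches.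
import Mathlib
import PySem

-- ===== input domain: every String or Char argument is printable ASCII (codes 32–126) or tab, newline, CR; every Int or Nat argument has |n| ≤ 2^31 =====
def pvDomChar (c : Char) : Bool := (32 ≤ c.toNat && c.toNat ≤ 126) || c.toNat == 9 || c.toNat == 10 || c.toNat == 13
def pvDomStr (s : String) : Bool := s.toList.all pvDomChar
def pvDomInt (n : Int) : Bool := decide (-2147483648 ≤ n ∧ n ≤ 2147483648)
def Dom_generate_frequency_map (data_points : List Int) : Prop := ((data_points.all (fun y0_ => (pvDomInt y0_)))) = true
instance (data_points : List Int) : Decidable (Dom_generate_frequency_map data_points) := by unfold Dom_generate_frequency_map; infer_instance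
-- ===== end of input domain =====

-- B replaces A's single-pass accumulation with a dict comprehension counting each element by rescanning the list (idiomatic; not faster).

-- ===== PORT A =====
def generate_frequency_map (data_points : List Int) : List (Int × Int) :=
  (data_points.foldl
    (fun results point =>
      if results.contains point then results.modify point 0 (· + 1)
      else results.insert point 1)
    PySem.Dict.empty).items

-- ===== PORT B =====
def generate_frequency_map_alt (data_points : List Int) : List (Int × Int) :=
  (data_points.foldl
    (fun d p => d.insert p ((PySem.List.count data_points p : Nat) : Int))
    PySem.Dict.empty).items

-- ===== PRECONDITION & SPEC =====
def Spec_generate_frequency_map (data_points : List Int) (out : List (Int × Int)) : Prop := out = generate_frequency_map_alt data_points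
instance (data_points : List Int) (out : List (Int × Int)) : Decidable (Spec_generate_frequency_map data_points out) := by unfold Spec_generate_frequency_map; infer_instance

-- ===== CLAIM (what is proved, stated in full; the proofs are below) =====
def Claim_equal_generate_frequency_map : Prop := ∀ (data_points : List Int), Dom_generate_frequency_map data_points → Spec_generate_frequency_map data_points (generate_frequency_map data_points)

-- ===== LEMMAS AND PROOFS =====

-- A's loop body equals Counter's loop body pointwise.
theorem gfm_step_eq (d : PySem.Dict Int Int) (p : Int) :
    (if d.contains p then d.modify p 0 (· + 1) else d.insert p 1) = d.modify p 0 (· + 1) := by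
  by_cases h : d.contains p = true
  · simp [h]
  · have h' : d.contains p = false := by simpa using h
    simp [h', PySem.Dict.insert, PySem.Dict.modify, PySem.Dict.getD_of_not_contains d 0 h']

-- A's dict is Counter(data_points).
theorem gfm_A_eq_counter (xs : List Int) :
    xs.foldl (fun results point =>
      if results.contains point then results.modify point 0 (· + 1)
      else results.insert point 1) PySem.Dict.empty = PySem.Dict.counter xs := by
  rw [PySem.Dict.counter_eq_foldl]
  have hfg : (fun (results : PySem.Dict Int Int) point =>
      if results.contains point then results.modify point 0 (· + 1)
      else results.insert point 1) = fun d x => d.modify x 0 (· + 1) :=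
    funext fun d => funext fun p => gfm_step_eq d p
  rw [hfg]

-- Value reached by B's insert-only loop.
theorem gfm_getD_foldl_insert (c : Int → Int) (l : List Int) (d : PySem.Dict Int Int) (k : Int) :
    (l.foldl (fun d p => d.insert p (c p)) d).getD k 0
      = if k ∈ l then c k else d.getD k 0 := by
  induction l generalizing d with
  | nil => simp
  | cons x t ih =>
      simp only [List.foldl_cons, ih, PySem.Dict.getD_insert, List.mem_cons]
      by_cases hk : k ∈ t
      · simp [hk]
      · by_cases he : k = x <;> simp [hk, he]

theorem gfm_B_items (xs : List Int) :
    generate_frequency_map_alt xs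
      = (PySem.Set.ofList xs).map (fun k => (k, (xs.count k : Int))) := by
  unfold generate_frequency_map_alt
  have hnd : (xs.foldl (fun d p => d.insert p ((PySem.List.count xs p : Nat) : Int)) PySem.Dict.empty).keys.Nodup :=
    PySem.Dict.nodup_keys_foldl_insert _ _ _ (by simp)
  have hkeys : (xs.foldl (fun d p => d.insert p ((PySem.List.count xs p : Nat) : Int)) PySem.Dict.empty).keys
      = PySem.Set.ofList xs := by
    rw [PySem.Dict.keys_foldl_insert]
    simp [PySem.Set.update_nil_left]
  rw [PySem.Dict.items_eq_map_keys _ hnd 0, hkeys]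
  apply List.map_congr_left
  intro k hk
  have hkmem : k ∈ xs := (PySem.Set.mem_ofList xs k).1 hk
  have := gfm_getD_foldl_insert (fun p => ((PySem.List.count xs p : Nat) : Int)) xs PySem.Dict.empty k
  simp [hkmem, PySem.List.count] at this
  simp [this, PySem.List.count]

-- ===== VERDICT (by name: the statement is the Claim_ definition above) =====
theorem generate_frequency_map_spec : Claim_equal_generate_frequency_map := by
  intro xs _
  unfold Spec_generate_frequency_map generate_frequency_map
  rw [gfm_A_eq_counter, PySem.Dict.items_counter, gfm_B_items]
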